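-- pv_equiv track=rewrite | github.com/MineTime23/Algorithm | 프로그래머스/unrated/133502. 햄버거 만들기/햄버거 만들기.py | solution
-- ===== SOURCE A (Python) =====
-- def solution(ingredient):
--     answer = 0
--     str1 = ""
--     for i in ingredient:
--         str1 += str(i)
--         if str1.endswith("1231"):
--             answer += 1
--             str1 = str1[:-4]
--     return answer
-- ===== SOURCE B (Python) =====
-- def solution(ingredient):
--     # KMP-style matching automaton for "1231": keep a stack of automaton
--     # states (no characters stored); a full match is "top state == 4".
--     def nxt(q, c):
--         if q == 4:
--             q = 1  # failure link after a full match (border of "1231" is "1")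
--         if (q == 0 and c == "1") or (q == 1 and c == "2") \
--                 or (q == 2 and c == "3") or (q == 3 and c == "1"):
--             return q + 1
--         return 1 if c == "1" else 0
--
--     answer = 0
--     states = [0]
--     for i in ingredient:
--         for c in str(i):
--             states.append(nxt(states[-1], c))
--         if states[-1] == 4:
--             del states[-4:]
--             answer += 1
--     return answer
-- ===== Notes on version B (the rewrite author's own statement) =====
-- stated objective: alternative
-- what changed: Replaces A's buffer-string scan with endswith suffix comparison and slice-copy pops by a KMP-style matching automaton for "1231" that keeps only a stack of automaton states (no buffer characters), accepting an occurrence when the top state is 4 and popping four states.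
import Mathlib
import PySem

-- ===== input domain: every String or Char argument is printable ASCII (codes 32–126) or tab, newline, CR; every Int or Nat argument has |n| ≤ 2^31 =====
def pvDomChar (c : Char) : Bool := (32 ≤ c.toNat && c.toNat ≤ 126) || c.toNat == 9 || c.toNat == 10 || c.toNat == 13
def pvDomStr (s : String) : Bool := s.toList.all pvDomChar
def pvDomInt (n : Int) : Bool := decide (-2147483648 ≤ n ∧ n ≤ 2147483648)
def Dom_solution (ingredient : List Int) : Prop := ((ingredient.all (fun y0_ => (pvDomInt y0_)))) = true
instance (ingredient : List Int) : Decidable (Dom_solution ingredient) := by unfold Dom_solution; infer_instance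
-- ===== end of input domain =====

-- B replaces A's suffix string comparison by a KMP-style matching automaton for "1231"
-- keeping only a stack of automaton states (no buffer characters at all); return value proved equal.

-- ===== PORT A =====
-- literal port of A: str1 grows by str(i); on endswith("1231") pop via str1[:-4]
def solution (ingredient : List Int) : Int :=
  let st := ingredient.foldl
    (fun (st : Int × String) i =>
      let str1 := st.2 ++ PySem.Int.toStr i
      if PySem.Str.endswith str1 "1231" then
        (st.1 + 1, PySem.Str.slice str1 none (some (-4)))
      else
        (st.1, str1))
    (0, "")
  st.1

-- ===== PORT B =====
-- literal port of B's nxt(q, c): failure link after a full match, then one table test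
def nxtL (q : Int) (c : Char) : Int :=
  let q := if q = 4 then 1 else q
  if (q = 0 ∧ c = '1') ∨ (q = 1 ∧ c = '2') ∨ (q = 2 ∧ c = '3') ∨ (q = 3 ∧ c = '1') then
    q + 1
  else if c = '1' then 1 else 0

-- literal port of B: stack of automaton states; states[-1] via pyGet? … (-1)
-- (states is never empty, so Python's states[-1] never raises; .getD 0 only totalizes)
def solution_alt (ingredient : List Int) : Int :=
  let st := ingredient.foldl
    (fun (st : Int × List Int) i =>
      let states := (PySem.Int.toChars i).foldl
        (fun (sts : List Int) c => sts ++ [nxtL ((PySem.List.pyGet? sts (-1)).getD 0) c]) st.2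
      if PySem.List.pyGet? states (-1) = some 4 then
        (st.1 + 1, states.take (states.length - 4))
      else
        (st.1, states))
    (0, [0])
  st.1

-- ===== PRECONDITION & SPEC =====
def Spec_solution (ingredient : List Int) (out : Int) : Prop := out = solution_alt ingredient
instance (ingredient : List Int) (out : Int) : Decidable (Spec_solution ingredient out) := by unfold Spec_solution; infer_instance

-- ===== CLAIM (what is proved, stated in full; the proofs are below) =====
def Claim_equal_solution : Prop := ∀ (ingredient : List Int), Dom_solution ingredient → Spec_solution ingredient (solution ingredient)

-- ===== LEMMAS AND PROOFS =====

-- B's inner-loop step and the state list it builds (proof-side names for the port's lambdas)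
def fB (sts : List Int) (c : Char) : List Int :=
  sts ++ [nxtL ((PySem.List.pyGet? sts (-1)).getD 0) c]

def auto (cs : List Char) : List Int := cs.foldl fB [0]

-- the automaton state of a buffer: length of the longest suffix that is a prefix of "1231"
def mst (cs : List Char) : Int :=
  if PySem.Chars.endswith cs ['1','2','3','1'] then 4
  else if PySem.Chars.endswith cs ['1','2','3'] then 3
  else if PySem.Chars.endswith cs ['1','2'] then 2
  else if PySem.Chars.endswith cs ['1'] then 1
  else 0

lemma ew_snoc (cs : List Char) (c : Char) (p : List Char) (x : Char) :
    PySem.Chars.endswith (cs ++ [c]) (p ++ [x]) = true ↔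
      (c = x ∧ PySem.Chars.endswith cs p = true) := by
  rw [PySem.Chars.endswith_iff, PySem.Chars.endswith_iff]
  constructor
  · rintro ⟨t, ht⟩
    rw [← List.append_assoc, ← List.concat_eq_append, ← List.concat_eq_append] at ht
    obtain ⟨h1, h2⟩ := List.concat_inj.mp ht
    exact ⟨h2.symm, ⟨t, h1⟩⟩
  · rintro ⟨rfl, t, rfl⟩
    exact ⟨t, by simp⟩

lemma ew_last (cs : List Char) (p : List Char) (x : Char)
    (h : PySem.Chars.endswith cs (p ++ [x]) = true) : cs.getLast? = some x := by
  rw [PySem.Chars.endswith_iff] at h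
  obtain ⟨t, rfl⟩ := h
  simp

lemma e4_e1 (cs : List Char) (h : PySem.Chars.endswith cs ['1','2','3','1'] = true) :
    PySem.Chars.endswith cs ['1'] = true := by
  rw [PySem.Chars.endswith_iff] at h ⊢
  obtain ⟨t, rfl⟩ := h
  exact ⟨t ++ ['1','2','3'], by simp⟩

lemma ew_one (cs : List Char) (c : Char) :
    PySem.Chars.endswith (cs ++ [c]) ['1'] = true ↔ c = '1' := by
  rw [show (['1'] : List Char) = [] ++ ['1'] from rfl, ew_snoc]
  simp [PySem.Chars.endswith_iff]

-- the automaton step matches the longest-suffix characterization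
lemma step (cs : List Char) (c : Char) : mst (cs ++ [c]) = nxtL (mst cs) c := by
  have h4 := ew_snoc cs c ['1','2','3'] '1'
  have h3 := ew_snoc cs c ['1','2'] '3'
  have h2 := ew_snoc cs c ['1'] '2'
  have h1 := ew_one cs c
  unfold mst nxtL
  by_cases E4 : PySem.Chars.endswith cs ['1','2','3','1'] = true
  · have l1 : cs.getLast? = some '1' := ew_last cs ['1','2','3'] '1' E4
    have nE3 : ¬ PySem.Chars.endswith cs ['1','2','3'] = true := fun h => by
      have := ew_last cs ['1','2'] '3' h; rw [l1] at this; simp at this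
    have nE2 : ¬ PySem.Chars.endswith cs ['1','2'] = true := fun h => by
      have := ew_last cs ['1'] '2' h; rw [l1] at this; simp at this
    have E1 := e4_e1 cs E4
    simp only [E4, if_true]
    norm_num
    split_ifs <;> simp_all
  · by_cases E3 : PySem.Chars.endswith cs ['1','2','3'] = true
    · have l1 : cs.getLast? = some '3' := ew_last cs ['1','2'] '3' E3
      have nE2 : ¬ PySem.Chars.endswith cs ['1','2'] = true := fun h => by
        have := ew_last cs ['1'] '2' h; rw [l1] at this; simp at this
      have nE1 : ¬ PySem.Chars.endswith cs ['1'] = true := fun h => by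
        have := ew_last cs [] '1' h; rw [l1] at this; simp at this
      simp only [E4, E3, if_true]
      split_ifs <;> simp_all
    · by_cases E2 : PySem.Chars.endswith cs ['1','2'] = true
      · have l1 : cs.getLast? = some '2' := ew_last cs ['1'] '2' E2
        have nE1 : ¬ PySem.Chars.endswith cs ['1'] = true := fun h => by
          have := ew_last cs [] '1' h; rw [l1] at this; simp at this
        simp only [E4, E3, E2, if_true]
        split_ifs <;> simp_all
      · by_cases E1 : PySem.Chars.endswith cs ['1'] = true
        · simp only [E4, E3, E2, E1, if_true]
          split_ifs <;> simp_all
        · simp only [E4, E3, E2, E1]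
          split_ifs <;> simp_all

-- fB only appends, so any fold over it extends its start
lemma foldl_fB_form (ds : List Char) : ∀ init : List Int, ∃ r, ds.foldl fB init = init ++ r := by
  induction ds with
  | nil => intro init; exact ⟨[], by simp⟩
  | cons d t ih =>
    intro init
    obtain ⟨r, hr⟩ := ih (fB init d)
    refine ⟨[nxtL ((PySem.List.pyGet? init (-1)).getD 0) d] ++ r, ?_⟩
    rw [List.foldl_cons]
    rw [show fB init d = init ++ [nxtL ((PySem.List.pyGet? init (-1)).getD 0) d] from rfl,
        List.append_assoc] at hr
    exact hr

lemma auto_length (cs : List Char) : (auto cs).length = cs.length + 1 := by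
  have : ∀ (ds : List Char) (init : List Int), (ds.foldl fB init).length = init.length + ds.length := by
    intro ds
    induction ds with
    | nil => simp
    | cons d t ih =>
      intro init
      rw [List.foldl_cons, ih (fB init d)]
      simp [fB]
      omega
  have h := this cs [0]
  unfold auto
  simp at h
  omega

lemma auto_last (cs : List Char) : (auto cs).getLast? = some (mst cs) := by
  induction cs using List.reverseRecOn with
  | nil => decide
  | append_singleton cs c ih =>
    have h : auto (cs ++ [c]) = fB (auto cs) c := by simp [auto, List.foldl_append]
    rw [h, step]
    simp [fB, PySem.List.pyGet?_neg_one, ih]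

lemma auto_take (cs : List Char) (m : Nat) (hm : m ≤ cs.length) :
    (auto cs).take (m + 1) = auto (cs.take m) := by
  have hsplit : auto cs = (cs.drop m).foldl fB (auto (cs.take m)) := by
    show List.foldl fB [0] cs = List.foldl fB (List.foldl fB [0] (cs.take m)) (cs.drop m)
    rw [← List.foldl_append, List.take_append_drop]
  obtain ⟨r, hr⟩ := foldl_fB_form (cs.drop m) (auto (cs.take m))
  rw [hsplit, hr, List.take_left']
  rw [auto_length]
  simp [hm]

lemma e4_len (cs : List Char) (h : PySem.Chars.endswith cs ['1','2','3','1'] = true) :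
    4 ≤ cs.length := by
  rw [PySem.Chars.endswith_iff] at h
  obtain ⟨t, rfl⟩ := h
  simp

lemma toList_1231 : ("1231" : String).toList = ['1','2','3','1'] := by decide

lemma mst_four_iff (cs : List Char) :
    mst cs = 4 ↔ PySem.Chars.endswith cs ['1','2','3','1'] = true := by
  unfold mst
  split_ifs <;> simp_all

-- the two folds stay related: A's buffer characters determine B's state stack
lemma fold_eq : ∀ (l : List Int) (a : Int) (str : String) (states : List Int),
    states = auto str.toList →
    (l.foldl (fun (st : Int × String) i =>
      let str1 := st.2 ++ PySem.Int.toStr i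
      if PySem.Str.endswith str1 "1231" then
        (st.1 + 1, PySem.Str.slice str1 none (some (-4)))
      else
        (st.1, str1)) (a, str)).1 =
    (l.foldl (fun (st : Int × List Int) i =>
      let states := (PySem.Int.toChars i).foldl
        (fun (sts : List Int) c => sts ++ [nxtL ((PySem.List.pyGet? sts (-1)).getD 0) c]) st.2
      if PySem.List.pyGet? states (-1) = some 4 then
        (st.1 + 1, states.take (states.length - 4))
      else
        (st.1, states)) (a, states)).1 := by
  intro l
  induction l with
  | nil => intro a str states h; rfl
  | cons i t ih =>
    intro a str states h
    simp only [List.foldl_cons]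
    set cs' := str.toList ++ PySem.Int.toChars i with hcs'
    have htl : (str ++ PySem.Int.toStr i).toList = cs' := by simp [hcs']
    have hstates' : (PySem.Int.toChars i).foldl
        (fun (sts : List Int) c => sts ++ [nxtL ((PySem.List.pyGet? sts (-1)).getD 0) c]) states
        = auto cs' := by
      rw [h, hcs']
      show (PySem.Int.toChars i).foldl fB (auto str.toList) = auto (str.toList ++ PySem.Int.toChars i)
      rw [auto, auto, List.foldl_append]
    have hlast : PySem.List.pyGet? (auto cs') (-1) = some (mst cs') := by
      rw [PySem.List.pyGet?_neg_one, auto_last]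
    have hcond : (PySem.List.pyGet? (auto cs') (-1) = some 4) ↔
        PySem.Str.endswith (str ++ PySem.Int.toStr i) "1231" = true := by
      rw [hlast, show PySem.Str.endswith (str ++ PySem.Int.toStr i) "1231" =
            PySem.Chars.endswith (str ++ PySem.Int.toStr i).toList ("1231").toList from by simp,
          toList_1231, htl, ← mst_four_iff]
      constructor
      · intro hx; exact Option.some_inj.mp hx
      · intro hx; rw [hx]
    by_cases hb : PySem.Str.endswith (str ++ PySem.Int.toStr i) "1231" = true
    · have hB : PySem.List.pyGet? (auto cs') (-1) = some 4 := hcond.mpr hb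
      have hE4 : PySem.Chars.endswith cs' ['1','2','3','1'] = true := by
        rw [show PySem.Str.endswith (str ++ PySem.Int.toStr i) "1231" =
              PySem.Chars.endswith (str ++ PySem.Int.toStr i).toList ("1231").toList from by simp,
            toList_1231, htl] at hb
        exact hb
      have hlen := e4_len cs' hE4
      simp only [hb, hstates', hB, if_pos]
      apply ih
      have hA : (PySem.Str.slice (str ++ PySem.Int.toStr i) none (some (-4))).toList =
          cs'.take (cs'.length - 4) := by
        rw [show (PySem.Str.slice (str ++ PySem.Int.toStr i) none (some (-4))).toList =
              PySem.List.slice (str ++ PySem.Int.toStr i).toList none (some (-4)) from by simp,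
            htl, PySem.List.slice_to_neg_ofNat _ 4 (by omega)]
      rw [hA, auto_length, show cs'.length + 1 - 4 = (cs'.length - 4) + 1 from by omega,
          auto_take cs' (cs'.length - 4) (by omega)]
    · have hB : ¬ PySem.List.pyGet? (auto cs') (-1) = some 4 := fun hx => hb (hcond.mp hx)
      simp only [hb, hstates', if_neg hB]
      exact ih _ _ _ (by rw [htl])

-- ===== VERDICT (by name: the statement is the Claim_ definition above) =====
theorem solution_spec : Claim_equal_solution := by
  intro ingredient _
  unfold Spec_solution solution solution_alt
  exact fold_eq ingredient 0 "" [0] (by decide)
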